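-- pv_equiv track=rewrite | github.com/christopherkeim/Underdog-Devs | More_Wordplay/solutions/get_longest_rstlne.py | get_longest_rstlne
-- ===== SOURCE A (Python) =====
-- def get_longest_rstlne(scrabble_words: list[str]) -> list[str]:
--     # define target letters as a set[str]
--     VALID_LETTERS: set[str] = {"R", "S", "T", "L", "N", "E"}
--
--     # initialize longest_length variable = 0
--     longest_length: int = 0
--     # longest_rstlne_word = []
--     longest_rstlne_words: list[str] = []
--
--     # Loop over every word in scrabble_words
--     for word in scrabble_words:
--         # if set(word) is a subset of target letters
--         if set(word).issubset(VALID_LETTERS):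
--             # measure its length
--             curr_length: int = len(word)
--
--             # If this length is greater than longest_length overwrite our list of
--             # longest matches
--             if curr_length > longest_length:
--                 longest_rstlne_words = [word]
--                 # Update the longest_length
--                 longest_length: int = curr_length
--             # If this length is equal to the longest_length, append the word
--             elif curr_length == longest_length:
--                 longest_rstlne_words.append(word)
--
--     # Return longest_matches
--     return longest_rstlne_words
-- ===== SOURCE B (Python) =====
-- def get_longest_rstlne(scrabble_words: list[str]) -> list[str]:
--     valid = [w for w in scrabble_words if all(c in "RSTLNE" for c in w)]
--     if not valid:
--         return []
--     longest = max(len(w) for w in valid)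
--     return [w for w in valid if len(w) == longest]
-- ===== Notes on version B (the rewrite author's own statement) =====
-- stated objective: simpler
-- what changed: A's single running-max loop with in-place list resets is decomposed into three plain passes: filter the valid words, take the max length, filter by that length.
import Mathlib
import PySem

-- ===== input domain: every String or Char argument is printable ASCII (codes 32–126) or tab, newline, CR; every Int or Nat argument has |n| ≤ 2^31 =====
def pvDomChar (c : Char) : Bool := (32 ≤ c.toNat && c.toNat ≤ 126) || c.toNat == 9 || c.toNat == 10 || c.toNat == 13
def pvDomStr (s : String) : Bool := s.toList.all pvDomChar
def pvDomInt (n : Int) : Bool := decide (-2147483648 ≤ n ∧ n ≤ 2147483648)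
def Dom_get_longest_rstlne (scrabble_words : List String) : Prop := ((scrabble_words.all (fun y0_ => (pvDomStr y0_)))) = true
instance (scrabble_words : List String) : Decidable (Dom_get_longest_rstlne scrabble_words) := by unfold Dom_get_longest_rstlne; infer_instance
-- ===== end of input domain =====

-- B decomposes A's single running-max loop into three plain passes (filter, max, filter); same result, proved equal.


-- ===== PORT A =====
-- VALID_LETTERS = {"R","S","T","L","N","E"}
def pvValidLetters : PySem.Set Char := PySem.Set.ofList ['R', 'S', 'T', 'L', 'N', 'E']

-- one iteration of A's for-loop, state = (longest_length, longest_rstlne_words)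
def pvStepA (st : Int × List String) (word : String) : Int × List String :=
  if PySem.Set.issubset (PySem.Set.ofList word.toList) pvValidLetters then
    let curr : Int := PySem.Str.len word
    if curr > st.1 then (curr, [word])
    else if curr = st.1 then (st.1, st.2 ++ [word])
    else st
  else st

def get_longest_rstlne (scrabble_words : List String) : List String :=
  (scrabble_words.foldl pvStepA ((0 : Int), ([] : List String))).2

-- ===== PORT B =====
def pvValidB (w : String) : Bool := w.toList.all (fun c => c ∈ "RSTLNE".toList)

def get_longest_rstlne_alt (scrabble_words : List String) : List String :=
  let valid := scrabble_words.filter pvValidB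
  if valid = [] then []
  else
    match PySem.List.max? (valid.map PySem.Str.len) (fun x => x) with
    | none => []
    | some longest => valid.filter (fun w => PySem.Str.len w = longest)

-- ===== PRECONDITION & SPEC =====
def Spec_get_longest_rstlne (scrabble_words : List String) (out : List String) : Prop := out = get_longest_rstlne_alt scrabble_words
instance (scrabble_words : List String) (out : List String) : Decidable (Spec_get_longest_rstlne scrabble_words out) := by unfold Spec_get_longest_rstlne; infer_instance

-- ===== CLAIM (what is proved, stated in full; the proofs are below) =====
def Claim_equal_get_longest_rstlne : Prop := ∀ (scrabble_words : List String), Dom_get_longest_rstlne scrabble_words → Spec_get_longest_rstlne scrabble_words (get_longest_rstlne scrabble_words)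

-- ===== LEMMAS AND PROOFS =====

-- A's subset test and B's per-character test are the same predicate
lemma pvValid_eq (w : String) :
    PySem.Set.issubset (PySem.Set.ofList w.toList) pvValidLetters = pvValidB w := by
  simp only [pvValidB, pvValidLetters]
  by_cases h : ∀ c ∈ w.toList, c ∈ "RSTLNE".toList
  · have h1 : PySem.Set.issubset (PySem.Set.ofList w.toList) (PySem.Set.ofList ['R','S','T','L','N','E']) = true := by
      rw [PySem.Set.issubset_iff]
      intro x hx
      rw [PySem.Set.mem_ofList] at hx ⊢
      exact h x hx
    have h2 : w.toList.all (fun c => c ∈ "RSTLNE".toList) = true := by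
      simpa [List.all_eq_true] using h
    rw [h1, h2]
  · have h1 : ¬ (PySem.Set.issubset (PySem.Set.ofList w.toList) (PySem.Set.ofList ['R','S','T','L','N','E']) = true) := by
      rw [PySem.Set.issubset_iff]
      intro hc
      exact h (fun c hcmem => by
        have := hc c (by rw [PySem.Set.mem_ofList]; exact hcmem)
        rwa [PySem.Set.mem_ofList] at this)
    have h2 : ¬ (w.toList.all (fun c => c ∈ "RSTLNE".toList) = true) := by
      simpa [List.all_eq_true] using h
    rw [Bool.not_eq_true] at h1 h2
    rw [h1, h2]

lemma pvLen_nonneg (w : String) : (0 : Int) ≤ PySem.Str.len w := by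
  simp [PySem.Str.len_eq]

-- loop invariant: the fold from any state is (running max, pending list) in closed form
lemma pvLoopA (ws : List String) (m : Int) (acc : List String) :
    ws.foldl pvStepA (m, acc) =
      (((ws.filter pvValidB).map PySem.Str.len).foldl max m,
        (if ((ws.filter pvValidB).map PySem.Str.len).foldl max m = m then acc else []) ++
          (ws.filter pvValidB).filter
            (fun w => PySem.Str.len w = ((ws.filter pvValidB).map PySem.Str.len).foldl max m)) := by
  induction ws generalizing m acc with
  | nil => simp
  | cons w ws ih =>
    by_cases hv : pvValidB w = true
    · have hstep : pvStepA (m, acc) w =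
          if PySem.Str.len w > m then (PySem.Str.len w, [w])
          else if PySem.Str.len w = m then (m, acc ++ [w]) else (m, acc) := by
        simp [pvStepA, pvValid_eq, hv]
      have hfilter : (w :: ws).filter pvValidB = w :: ws.filter pvValidB := by
        simp [hv]
      rw [List.foldl_cons, hstep, hfilter]
      rcases lt_trichotomy m (PySem.Str.len w) with hlt | heq | hgt
      · -- curr > longest: reset
        rw [if_pos hlt, ih]
        have hmax : max m (PySem.Str.len w) = PySem.Str.len w := max_eq_right hlt.le
        have hbig : PySem.Str.len w ≤ ((ws.filter pvValidB).map PySem.Str.len).foldl max (PySem.Str.len w) :=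
          (PySem.List.le_foldl_max ((ws.filter pvValidB).map PySem.Str.len) (PySem.Str.len w)).1
        have hne : ¬ (((ws.filter pvValidB).map PySem.Str.len).foldl max (PySem.Str.len w) = m) := by
          intro hc; omega
        simp only [List.map_cons, List.foldl_cons, hmax, hne, if_false]
        by_cases hw : PySem.Str.len w = ((ws.filter pvValidB).map PySem.Str.len).foldl max (PySem.Str.len w)
        · simp [PySem.Str.len_eq] at hw
          simp [← hw]
        · simp [PySem.Str.len_eq] at hw
          simp [hw]
          exact fun hc => hw hc.symm
      · -- curr == longest: append
        rw [if_neg (by omega), if_pos heq.symm, ih]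
        simp only [List.map_cons, List.foldl_cons, ← heq, max_self]
        by_cases hM : ((ws.filter pvValidB).map PySem.Str.len).foldl max m = m
        · simp [PySem.Str.len_eq] at heq
          simp [hM, ← heq]
        · have hne' : ¬ (PySem.Str.len w = ((ws.filter pvValidB).map PySem.Str.len).foldl max m) := by
            rw [← heq]; exact fun hc => hM hc.symm
          simp [PySem.Str.len_eq] at hne'
          simp [hM, hne']
      · -- curr < longest: skip
        rw [if_neg (by omega), if_neg (by omega), ih]
        have hbig : m ≤ ((ws.filter pvValidB).map PySem.Str.len).foldl max m :=
          (PySem.List.le_foldl_max ((ws.filter pvValidB).map PySem.Str.len) m).1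
        have hmax : max m (PySem.Str.len w) = m := max_eq_left hgt.le
        have hw : ¬ (PySem.Str.len w = ((ws.filter pvValidB).map PySem.Str.len).foldl max m) := by
          intro hc; omega
        simp [PySem.Str.len_eq] at hw
        simp only [List.map_cons, List.foldl_cons, hmax]
        simp [hw]
    · have hstep : pvStepA (m, acc) w = (m, acc) := by
        simp [pvStepA, pvValid_eq, hv]
      have hfilter : (w :: ws).filter pvValidB = ws.filter pvValidB := by
        simp [hv]
      rw [List.foldl_cons, hstep, hfilter, ih]

-- ===== VERDICT (by name: the statement is the Claim_ definition above) =====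
theorem get_longest_rstlne_spec : Claim_equal_get_longest_rstlne := by
  intro ws _
  show get_longest_rstlne ws = get_longest_rstlne_alt ws
  rw [get_longest_rstlne, pvLoopA]
  rw [get_longest_rstlne_alt]
  cases hvs : ws.filter pvValidB with
  | nil => simp
  | cons v t =>
    have hvne : ¬ (ws.filter pvValidB = []) := by rw [hvs]; simp
    simp only [List.map_cons, List.foldl_cons]
    rw [PySem.List.max?_id_cons]
    have h0 : max (0 : Int) (PySem.Str.len v) = PySem.Str.len v :=
      max_eq_right (pvLen_nonneg v)
    simp only [h0]
    simp
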